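-- pv_equiv track=rewrite | github.com/S-Christensen/cartographersStudy | scoringCards.py | calculate_points_for_empty_adjacent
-- ===== SOURCE A (Python) =====
-- def calculate_points_for_empty_adjacent(grid, cluster):
--     points = 0
--     for r, c in cluster:
--         for dr, dc in [(1, 0), (-1, 0), (0, 1), (0, -1)]:
--             nr, nc = r + dr, c + dc
--             if 0 <= nr < len(grid) and 0 <= nc < len(grid[0]) and grid[nr][nc] == 0:
--                 points += 1
--     return points
-- ===== SOURCE B (Python) =====
-- def calculate_points_for_empty_adjacent(grid, cluster):
--     # Count from the empty side: multiset of cluster coordinates, then one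
--     # scan over the grid adding, for each empty cell, how many of its four
--     # neighbors are cluster cells (with multiplicity).
--     counts = {}
--     for rc in cluster:
--         counts[rc] = counts.get(rc, 0) + 1
--     total = 0
--     for i, row in enumerate(grid):
--         for j, v in enumerate(row):
--             if v == 0:
--                 total += (counts.get((i - 1, j), 0) + counts.get((i + 1, j), 0)
--                           + counts.get((i, j - 1), 0) + counts.get((i, j + 1), 0))
--     return total
-- ===== Notes on version B (the rewrite author's own statement) =====
-- stated objective: alternative
-- what changed: B counts the same cluster-empty adjacencies from the empty side: it builds a multiplicity dict of cluster coordinates once and then makes one pass over the grid, adding for each empty cell the multiplicities of its four neighbors, instead of A's loop over cluster cells probing the grid.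
-- outside the precondition, e.g. on calculate_points_for_empty_adjacent([[1], [0, 0]], [(0, 1)]): A returns 0, B returns 1
import Mathlib
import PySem

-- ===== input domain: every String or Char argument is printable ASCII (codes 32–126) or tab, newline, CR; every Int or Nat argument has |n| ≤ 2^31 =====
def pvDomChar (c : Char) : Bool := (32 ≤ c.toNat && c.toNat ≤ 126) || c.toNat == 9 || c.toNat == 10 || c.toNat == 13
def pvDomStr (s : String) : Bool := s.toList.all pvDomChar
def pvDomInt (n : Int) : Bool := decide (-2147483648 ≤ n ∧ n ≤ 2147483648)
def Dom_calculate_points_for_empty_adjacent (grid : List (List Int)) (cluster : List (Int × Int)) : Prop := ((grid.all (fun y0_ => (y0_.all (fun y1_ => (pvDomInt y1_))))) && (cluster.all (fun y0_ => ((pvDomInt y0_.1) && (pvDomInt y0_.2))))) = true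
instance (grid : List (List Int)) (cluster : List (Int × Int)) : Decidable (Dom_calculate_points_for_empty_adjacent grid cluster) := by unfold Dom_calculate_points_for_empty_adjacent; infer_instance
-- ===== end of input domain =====

-- B counts the same cluster/empty adjacencies from the empty-cell side via a
-- multiplicity dict of cluster coordinates (objective: alternative algorithm, not faster).

-- ===== PORT A =====
-- 'grid[0]' is reached only when 0 ≤ nr < len(grid) (Python's short-circuit), so
-- 'grid.headD []' is exact there; pyGet? is some on the in-range indices the guard admits.
def calculate_points_for_empty_adjacent (grid : List (List Int)) (cluster : List (Int × Int)) : Int :=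
  cluster.foldl (fun points rc =>
    ([((1:Int),(0:Int)), (-1,0), (0,1), (0,-1)] : List (Int × Int)).foldl (fun points d =>
      if 0 ≤ rc.1 + d.1 ∧ rc.1 + d.1 < (grid.length : Int) ∧ 0 ≤ rc.2 + d.2 ∧
          rc.2 + d.2 < ((grid.headD []).length : Int) ∧
          (PySem.List.pyGet? grid (rc.1 + d.1)).bind
            (fun row => PySem.List.pyGet? row (rc.2 + d.2)) = some 0
      then points + 1 else points) points) 0

-- ===== PORT B =====
def calculate_points_for_empty_adjacent_alt (grid : List (List Int)) (cluster : List (Int × Int)) : Int :=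
  let counts : PySem.Dict (Int × Int) Int :=
    cluster.foldl (fun d rc => d.insert rc (d.getD rc 0 + 1)) PySem.Dict.empty
  (PySem.List.enumerate grid 0).foldl (fun total ir =>
    (PySem.List.enumerate ir.2 0).foldl (fun total jv =>
      if jv.2 == 0 then
        total + counts.getD (ir.1 - 1, jv.1) 0 + counts.getD (ir.1 + 1, jv.1) 0
              + counts.getD (ir.1, jv.1 - 1) 0 + counts.getD (ir.1, jv.1 + 1) 0
      else total) total) 0

-- ===== PRECONDITION & SPEC =====
-- Pre_ excludes inputs where, at some neighbor position of a cluster cell that lies in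
-- row range, being inside the grid's first row's width disagrees with being inside that
-- neighbor row's own width: there A (which bound-checks every row against len(grid[0]))
-- raises IndexError or consults the wrong row's width, a raggedness artefact of A.
def Pre_calculate_points_for_empty_adjacent (grid : List (List Int)) (cluster : List (Int × Int)) : Prop :=
  ∀ rc ∈ cluster, ∀ d ∈ ([((1:Int),(0:Int)), (-1,0), (0,1), (0,-1)] : List (Int × Int)),
    (0 ≤ rc.1 + d.1 ∧ rc.1 + d.1 < (grid.length : Int) ∧ 0 ≤ rc.2 + d.2) →
      (rc.2 + d.2 < ((grid.headD []).length : Int) ↔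
       rc.2 + d.2 < ((grid.getD (rc.1 + d.1).toNat []).length : Int))
instance (grid : List (List Int)) (cluster : List (Int × Int)) : Decidable (Pre_calculate_points_for_empty_adjacent grid cluster) := by unfold Pre_calculate_points_for_empty_adjacent; infer_instance
def pvWitness_calculate_points_for_empty_adjacent : List (List Int) × (List (Int × Int)) := ([[0, 1], [1, 0]], [(0, 1)])
def Spec_calculate_points_for_empty_adjacent (grid : List (List Int)) (cluster : List (Int × Int)) (out : Int) : Prop := out = calculate_points_for_empty_adjacent_alt grid cluster
instance (grid : List (List Int)) (cluster : List (Int × Int)) (out : Int) : Decidable (Spec_calculate_points_for_empty_adjacent grid cluster out) := by unfold Spec_calculate_points_for_empty_adjacent; infer_instance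

-- ===== CLAIM (what is proved, stated in full; the proofs are below) =====
def Claim_equal_calculate_points_for_empty_adjacent : Prop := ∀ (grid : List (List Int)) (cluster : List (Int × Int)), Dom_calculate_points_for_empty_adjacent grid cluster → Pre_calculate_points_for_empty_adjacent grid cluster → Spec_calculate_points_for_empty_adjacent grid cluster (calculate_points_for_empty_adjacent grid cluster)

-- ===== LEMMAS AND PROOFS =====

-- sum-of-contributions view of one grid row / of the grid
def pvRowSum (row : List Int) (s : Int) (f : Int → Int) : Int :=
  ((PySem.List.enumerate row s).map (fun jv => if jv.2 = 0 then f jv.1 else 0)).sum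

def pvGridSum (grid : List (List Int)) (s : Int) (f : Int → Int → Int) : Int :=
  ((PySem.List.enumerate grid s).map (fun ir => pvRowSum ir.2 0 (f ir.1))).sum

lemma pvRowSum_congr (row : List Int) (s : Int) (f g : Int → Int)
    (h : ∀ j, f j = g j) : pvRowSum row s f = pvRowSum row s g := by
  simp [pvRowSum, h]

lemma pvGridSum_congr (grid : List (List Int)) (s : Int) (f g : Int → Int → Int)
    (h : ∀ i j, f i j = g i j) : pvGridSum grid s f = pvGridSum grid s g := by
  unfold pvGridSum
  congr 1
  exact List.map_congr_left (fun ir _ => pvRowSum_congr _ _ _ _ (h ir.1))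

lemma pvRowSum_zero (row : List Int) (s : Int) : pvRowSum row s (fun _ => 0) = 0 := by
  simp [pvRowSum]

lemma pvGridSum_zero (grid : List (List Int)) (s : Int) :
    pvGridSum grid s (fun _ _ => 0) = 0 := by
  simp [pvGridSum, pvRowSum]

lemma pvRowSum_add (row : List Int) (s : Int) (f g : Int → Int) :
    pvRowSum row s (fun j => f j + g j) = pvRowSum row s f + pvRowSum row s g := by
  induction row generalizing s with
  | nil => simp [pvRowSum]
  | cons v t ih =>
    simp only [pvRowSum, PySem.List.enumerate_cons, List.map_cons, List.sum_cons] at *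
    rw [ih (s+1)]; split_ifs <;> ring

lemma pvGridSum_add (grid : List (List Int)) (s : Int) (f g : Int → Int → Int) :
    pvGridSum grid s (fun i j => f i j + g i j) = pvGridSum grid s f + pvGridSum grid s g := by
  induction grid generalizing s with
  | nil => simp [pvGridSum]
  | cons r t ih =>
    simp only [pvGridSum, PySem.List.enumerate_cons, List.map_cons, List.sum_cons] at *
    rw [ih (s+1), pvRowSum_add]; ring

-- one target cell: the row-level point mass
lemma pvRowSum_point (row : List Int) (s qc : Int) :
    pvRowSum row s (fun j => if j = qc then 1 else 0) =
      if PySem.List.pyGet? row (qc - s) = some 0 ∧ s ≤ qc then 1 else 0 := by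
  induction row generalizing s with
  | nil => simp [pvRowSum, PySem.List.pyGet?]
  | cons v t ih =>
    simp only [pvRowSum, PySem.List.enumerate_cons, List.map_cons, List.sum_cons] at *
    rw [ih (s+1)]
    by_cases hs : s = qc
    · subst hs
      have h0 : s - s = (0:Int) := by ring
      have hle : ¬ (s + 1 ≤ s) := by omega
      simp only [h0, PySem.List.pyGet?_zero_cons, hle, and_false, if_false]
      split_ifs <;> simp_all
    · by_cases hle : s + 1 ≤ qc
      · have h1 : 0 ≤ qc - s := by omega
        have h2 : 0 ≤ qc - (s+1) := by omega
        rw [PySem.List.pyGet?_of_nonneg _ h1, PySem.List.pyGet?_of_nonneg _ h2]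
        have h3 : (qc - s).toNat = (qc - (s+1)).toNat + 1 := by omega
        rw [h3]
        simp only [List.getElem?_cons_succ]
        have : ¬ (s = qc) := hs
        split_ifs with h4 h5 h5 <;> simp_all
      · have hno : ¬ (s ≤ qc) := by omega
        simp [hs, hno, hle]

-- one target cell: the grid-level point mass
lemma pvGridSum_point (grid : List (List Int)) (s : Int) (q : Int × Int) :
    pvGridSum grid s (fun i j => if (i, j) = q then 1 else 0) =
      if ((PySem.List.pyGet? grid (q.1 - s)).bind
            (fun row => PySem.List.pyGet? row q.2)) = some 0 ∧ s ≤ q.1 ∧ 0 ≤ q.2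
      then 1 else 0 := by
  rcases q with ⟨q1, q2⟩
  induction grid generalizing s with
  | nil => simp [pvGridSum, PySem.List.pyGet?]
  | cons r t ih =>
    simp only [pvGridSum, PySem.List.enumerate_cons, List.map_cons, List.sum_cons] at *
    rw [ih (s+1)]
    by_cases hs : s = q1
    · subst hs
      have h0 : s - s = (0:Int) := by ring
      have hle : ¬ (s + 1 ≤ s) := by omega
      have hrow : pvRowSum r 0 (fun j => if (s, j) = (s, q2) then 1 else 0)
          = pvRowSum r 0 (fun j => if j = q2 then 1 else 0) := by
        apply pvRowSum_congr
        intro j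
        simp [Prod.mk.injEq]
      rw [hrow, pvRowSum_point]
      simp only [h0, PySem.List.pyGet?_zero_cons, hle, false_and, and_false, if_false,
        Option.bind_some, sub_zero, add_zero]
      split_ifs <;> simp_all
    · have hrow : pvRowSum r 0 (fun j => if (s, j) = (q1, q2) then 1 else 0) = 0 := by
        rw [pvRowSum_congr r 0 _ (fun _ => 0), pvRowSum_zero]
        intro j
        simp [Prod.mk.injEq, hs]
      rw [hrow]
      by_cases hle : s + 1 ≤ q1
      · have h1 : 0 ≤ q1 - s := by omega
        have h2 : 0 ≤ q1 - (s+1) := by omega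
        rw [PySem.List.pyGet?_of_nonneg _ h1, PySem.List.pyGet?_of_nonneg _ h2]
        have h3 : (q1 - s).toNat = (q1 - (s+1)).toNat + 1 := by omega
        rw [h3]
        simp only [List.getElem?_cons_succ]
        have hsq : s ≤ q1 := by omega
        simp [hle, hsq]
      · have hno : ¬ (s ≤ q1) := by omega
        simp [hno, hle]

-- B's fold equals the neighbour-count grid sum
lemma pvFoldl_add_of {α : Type} (l : List α) (f : Int → α → Int) (g : α → Int)
    (h : ∀ a x, f a x = a + g x) (a : Int) : l.foldl f a = a + (l.map g).sum := by
  induction l generalizing a with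
  | nil => simp
  | cons x t ih => rw [List.foldl_cons, h, ih]; simp; ring

lemma pvB_eq_gridSum (grid : List (List Int)) (cluster : List (Int × Int)) :
    calculate_points_for_empty_adjacent_alt grid cluster =
      pvGridSum grid 0 (fun i j =>
        ((cluster.count (i - 1, j) : Int) + (cluster.count (i + 1, j) : Int) +
         (cluster.count (i, j - 1) : Int) + (cluster.count (i, j + 1) : Int))) := by
  unfold calculate_points_for_empty_adjacent_alt
  simp only [PySem.Dict.foldl_insert_getD_add_one_eq_counter, PySem.Dict.getD_counter]
  rw [pvFoldl_add_of _ _ (fun ir => pvRowSum ir.2 0 (fun j =>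
        ((cluster.count (ir.1 - 1, j) : Int) + (cluster.count (ir.1 + 1, j) : Int) +
         (cluster.count (ir.1, j - 1) : Int) + (cluster.count (ir.1, j + 1) : Int))))]
  · simp [pvGridSum]
  · intro a ir
    rw [pvFoldl_add_of _ _ (fun jv => if jv.2 = 0 then
        ((cluster.count (ir.1 - 1, jv.1) : Int) + (cluster.count (ir.1 + 1, jv.1) : Int) +
         (cluster.count (ir.1, jv.1 - 1) : Int) + (cluster.count (ir.1, jv.1 + 1) : Int)) else 0)]
    · simp [pvRowSum]
    · intro b jv
      by_cases h0 : jv.2 = 0 <;> simp [h0] <;> ring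
-- A's fold equals the per-cluster-cell sum
def pvAval (grid : List (List Int)) (rc : Int × Int) : Int :=
  ([((1:Int),(0:Int)), (-1,0), (0,1), (0,-1)] : List (Int × Int)).foldl (fun points d =>
      if 0 ≤ rc.1 + d.1 ∧ rc.1 + d.1 < (grid.length : Int) ∧ 0 ≤ rc.2 + d.2 ∧
          rc.2 + d.2 < ((grid.headD []).length : Int) ∧
          (PySem.List.pyGet? grid (rc.1 + d.1)).bind
            (fun row => PySem.List.pyGet? row (rc.2 + d.2)) = some 0
      then points + 1 else points) 0

lemma pvA_eq_sum (grid : List (List Int)) (cluster : List (Int × Int)) :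
    calculate_points_for_empty_adjacent grid cluster = (cluster.map (pvAval grid)).sum := by
  unfold calculate_points_for_empty_adjacent
  rw [pvFoldl_add_of _ _ (pvAval grid)]
  · simp
  · intro a rc
    unfold pvAval
    simp only [List.foldl]
    split_ifs <;> ring
-- under rectangularity the bound checks collapse to the lookups succeeding
lemma pvCond_iff (grid : List (List Int)) (nr nc : Int)
    (hq : (0 ≤ nr ∧ nr < (grid.length : Int) ∧ 0 ≤ nc) →
      (nc < ((grid.headD []).length : Int) ↔ nc < ((grid.getD nr.toNat []).length : Int))) :
    (0 ≤ nr ∧ nr < (grid.length : Int) ∧ 0 ≤ nc ∧ nc < ((grid.headD []).length : Int) ∧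
      (PySem.List.pyGet? grid nr).bind (fun row => PySem.List.pyGet? row nc) = some 0) ↔
    ((PySem.List.pyGet? grid nr).bind (fun row => PySem.List.pyGet? row nc) = some 0 ∧
      0 ≤ nr ∧ 0 ≤ nc) := by
  constructor
  · rintro ⟨h1, h2, h3, h4, h5⟩; exact ⟨h5, h1, h3⟩
  · rintro ⟨hb, h1, h3⟩
    rcases Option.bind_eq_some_iff.mp hb with ⟨row, hrow, hcell⟩
    rw [PySem.List.pyGet?_of_nonneg _ h1] at hrow
    rw [PySem.List.pyGet?_of_nonneg _ h3] at hcell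
    have hltg : nr.toNat < grid.length := by
      rcases List.getElem?_eq_some_iff.mp hrow with ⟨h, _⟩; exact h
    have hltr : nc.toNat < row.length := by
      rcases List.getElem?_eq_some_iff.mp hcell with ⟨h, _⟩; exact h
    have hget : grid.getD nr.toNat [] = row := by
      rw [List.getD_eq_getElem?_getD, hrow]; rfl
    have h2 : nr < (grid.length : Int) := by omega
    refine ⟨h1, h2, h3, ?_, hb⟩
    rw [hq ⟨h1, h2, h3⟩, hget]
    omega

lemma pvMain (grid : List (List Int)) (cluster : List (Int × Int))
    (hpre : Pre_calculate_points_for_empty_adjacent grid cluster) :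
    pvGridSum grid 0 (fun i j =>
        ((cluster.count (i - 1, j) : Int) + (cluster.count (i + 1, j) : Int) +
         (cluster.count (i, j - 1) : Int) + (cluster.count (i, j + 1) : Int))) =
      (cluster.map (pvAval grid)).sum := by
  induction cluster with
  | nil =>
    rw [pvGridSum_congr _ _ _ (fun _ _ => 0), pvGridSum_zero] <;> simp
  | cons rc cl ih =>
    have hpre' : Pre_calculate_points_for_empty_adjacent grid cl := by
      intro x hx; exact hpre x (List.mem_cons_of_mem _ hx)
    have hrc := hpre rc List.mem_cons_self
    specialize ih hpre' 
    have hsplit : pvGridSum grid 0 (fun i j =>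
        (((rc :: cl).count (i - 1, j) : Int) + ((rc :: cl).count (i + 1, j) : Int) +
         ((rc :: cl).count (i, j - 1) : Int) + ((rc :: cl).count (i, j + 1) : Int))) =
      pvGridSum grid 0 (fun i j =>
        ((cl.count (i - 1, j) : Int) + (cl.count (i + 1, j) : Int) +
         (cl.count (i, j - 1) : Int) + (cl.count (i, j + 1) : Int))) +
      (pvGridSum grid 0 (fun i j => if (i, j) = (rc.1 + 1, rc.2 + 0) then 1 else 0) +
       (pvGridSum grid 0 (fun i j => if (i, j) = (rc.1 + -1, rc.2 + 0) then 1 else 0) +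
        (pvGridSum grid 0 (fun i j => if (i, j) = (rc.1 + 0, rc.2 + 1) then 1 else 0) +
         pvGridSum grid 0 (fun i j => if (i, j) = (rc.1 + 0, rc.2 + -1) then 1 else 0)))) := by
      rw [← pvGridSum_add, ← pvGridSum_add, ← pvGridSum_add, ← pvGridSum_add]
      apply pvGridSum_congr
      intro i j
      rcases rc with ⟨r, c⟩
      simp only [List.count_cons, Prod.mk.injEq, beq_iff_eq, Prod.ext_iff]
      push_cast
      have e1 : (r = i - 1 ∧ c = j) = (i = r + 1 ∧ j = c + 0) := by
        apply propext; constructor <;> (rintro ⟨h1, h2⟩; constructor <;> omega)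
      have e2 : (r = i + 1 ∧ c = j) = (i = r + -1 ∧ j = c + 0) := by
        apply propext; constructor <;> (rintro ⟨h1, h2⟩; constructor <;> omega)
      have e3 : (r = i ∧ c = j - 1) = (i = r + 0 ∧ j = c + 1) := by
        apply propext; constructor <;> (rintro ⟨h1, h2⟩; constructor <;> omega)
      have e4 : (r = i ∧ c = j + 1) = (i = r + 0 ∧ j = c + -1) := by
        apply propext; constructor <;> (rintro ⟨h1, h2⟩; constructor <;> omega)
      simp only [e1, e2, e3, e4]
      ring
    rw [hsplit, ih]
    have hpt : ∀ q : Int × Int,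
        ((0 ≤ q.1 ∧ q.1 < (grid.length : Int) ∧ 0 ≤ q.2) →
          (q.2 < ((grid.headD []).length : Int) ↔ q.2 < ((grid.getD q.1.toNat []).length : Int))) →
        pvGridSum grid 0 (fun i j => if (i, j) = q then 1 else 0) =
        if 0 ≤ q.1 ∧ q.1 < (grid.length : Int) ∧ 0 ≤ q.2 ∧ q.2 < ((grid.headD []).length : Int) ∧
            (PySem.List.pyGet? grid q.1).bind (fun row => PySem.List.pyGet? row q.2) = some 0
        then 1 else 0 := by
      intro q hq
      rw [pvGridSum_point, sub_zero]
      exact (if_congr (pvCond_iff grid q.1 q.2 hq) rfl rfl).symm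
    have hd1 := hrc ((1:Int),(0:Int)) (by simp)
    have hd2 := hrc ((-1:Int),(0:Int)) (by simp)
    have hd3 := hrc ((0:Int),(1:Int)) (by simp)
    have hd4 := hrc ((0:Int),(-1:Int)) (by simp)
    rw [hpt (rc.1 + 1, rc.2 + 0) hd1, hpt (rc.1 + -1, rc.2 + 0) hd2,
        hpt (rc.1 + 0, rc.2 + 1) hd3, hpt (rc.1 + 0, rc.2 + -1) hd4]
    have hav : pvAval grid rc =
        (if 0 ≤ rc.1 + 1 ∧ rc.1 + 1 < (grid.length : Int) ∧ 0 ≤ rc.2 + 0 ∧ rc.2 + 0 < ((grid.headD []).length : Int) ∧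
            (PySem.List.pyGet? grid (rc.1 + 1)).bind (fun row => PySem.List.pyGet? row (rc.2 + 0)) = some 0 then 1 else 0) +
        ((if 0 ≤ rc.1 + -1 ∧ rc.1 + -1 < (grid.length : Int) ∧ 0 ≤ rc.2 + 0 ∧ rc.2 + 0 < ((grid.headD []).length : Int) ∧
            (PySem.List.pyGet? grid (rc.1 + -1)).bind (fun row => PySem.List.pyGet? row (rc.2 + 0)) = some 0 then 1 else 0) +
         ((if 0 ≤ rc.1 + 0 ∧ rc.1 + 0 < (grid.length : Int) ∧ 0 ≤ rc.2 + 1 ∧ rc.2 + 1 < ((grid.headD []).length : Int) ∧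
            (PySem.List.pyGet? grid (rc.1 + 0)).bind (fun row => PySem.List.pyGet? row (rc.2 + 1)) = some 0 then 1 else 0) +
          (if 0 ≤ rc.1 + 0 ∧ rc.1 + 0 < (grid.length : Int) ∧ 0 ≤ rc.2 + -1 ∧ rc.2 + -1 < ((grid.headD []).length : Int) ∧
            (PySem.List.pyGet? grid (rc.1 + 0)).bind (fun row => PySem.List.pyGet? row (rc.2 + -1)) = some 0 then 1 else 0))) := by
      unfold pvAval
      simp only [List.foldl]
      split_ifs <;> ring
    simp only [List.map_cons, List.sum_cons]
    rw [hav]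
    ring
-- ===== VERDICT (by name: the statement is the Claim_ definition above) =====
theorem calculate_points_for_empty_adjacent_spec : Claim_equal_calculate_points_for_empty_adjacent := by
  intro grid cluster _ hpre
  unfold Spec_calculate_points_for_empty_adjacent
  rw [pvA_eq_sum, pvB_eq_gridSum, pvMain grid cluster hpre]
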